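-- pv_equiv track=rewrite | github.com/DrillAura/Flow-Bot-AI | daytrading_bot/kraken.py | _result_series_key
-- ===== SOURCE A (Python) =====
-- from typing import Any
--
-- def _result_series_key(result: dict[str, Any], pair: str) -> str:
--     non_meta_keys = [key for key in result.keys() if key != "last"]
--     if not non_meta_keys:
--         raise RuntimeError(f"Kraken OHLC response for {pair} did not contain candle data")
--     for key in non_meta_keys:
--         if key == pair or key.replace("X", "").replace("Z", "") == pair:
--             return key
--     return non_meta_keys[0]
-- ===== SOURCE B (Python) =====
-- def _result_series_key(result, pair):
--     candidates = [(i, k) for i, k in enumerate(result) if k != "last"]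
--     if not candidates:
--         raise RuntimeError(f"Kraken OHLC response for {pair} did not contain candle data")
--     return min(candidates,
--                key=lambda ik: (0 if ik[1] == pair or ik[1].replace("X", "").replace("Z", "") == pair else 1,
--                                ik[0]))[1]
-- ===== Notes on version B (the rewrite author's own statement) =====
-- stated objective: alternative
-- what changed: Instead of filtering keys into a list, scanning it for a match and falling back to its head, B ranks every non-meta key by the tuple (0 if it matches else 1, position) and returns the key of minimal rank via a single min() selection.
import Mathlib
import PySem

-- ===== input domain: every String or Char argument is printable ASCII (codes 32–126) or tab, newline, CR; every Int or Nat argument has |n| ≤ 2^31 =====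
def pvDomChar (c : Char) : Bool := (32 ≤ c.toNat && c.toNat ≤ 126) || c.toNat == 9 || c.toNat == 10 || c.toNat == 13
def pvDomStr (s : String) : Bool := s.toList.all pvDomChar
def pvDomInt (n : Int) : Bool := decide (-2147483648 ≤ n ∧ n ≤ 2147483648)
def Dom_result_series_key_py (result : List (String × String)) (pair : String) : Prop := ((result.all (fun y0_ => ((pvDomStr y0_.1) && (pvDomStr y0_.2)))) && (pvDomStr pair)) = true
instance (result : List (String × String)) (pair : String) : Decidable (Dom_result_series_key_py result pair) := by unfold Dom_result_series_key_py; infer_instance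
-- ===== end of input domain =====

-- B ranks every non-meta key by (0 if it matches else 1, position) and takes the min of that
-- rank, instead of A's filter-then-scan-then-fallback.  A raises RuntimeError when there is no
-- key other than "last"; those inputs are outside Pre_.

-- key == pair or key.replace("X", "").replace("Z", "") == pair
def pvKeyMatch (pair key : String) : Bool :=
  key == pair || PySem.Str.replace (PySem.Str.replace key "X" "") "Z" "" == pair

-- ===== PORT A =====
def result_series_key_py (result : List (String × String)) (pair : String) : String :=
  -- result.keys(): distinct keys in insertion order
  let keys := PySem.List.dedup (result.map (·.1))
  let nonMeta := keys.filter (fun k => k != "last")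
  -- 'if not non_meta_keys: raise' — excluded by Pre_; "" stands for the raise
  match nonMeta.find? (fun k => pvKeyMatch pair k) with
  | some k => k
  | none => nonMeta.headD ""

-- ===== PORT B =====
-- B's key lambda: (0 if match else 1, index) — first component
def pvRank (pair : String) (p : Int × String) : Int :=
  if pvKeyMatch pair p.2 then 0 else 1

def result_series_key_py_alt (result : List (String × String)) (pair : String) : String :=
  let candidates :=
    (PySem.List.enumerate (PySem.List.dedup (result.map (·.1)))).filter
      (fun p => p.2 != "last")
  -- 'if not candidates: raise' — excluded by Pre_; "" stands for the raise
  match PySem.List.min2? candidates (pvRank pair) (fun p => p.1) with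
  | some m => m.2
  | none => ""

-- ===== PRECONDITION & SPEC =====
-- Pre_ excludes exactly the inputs where A raises RuntimeError: no key other than "last".
def Pre_result_series_key_py (result : List (String × String)) (pair : String) : Prop :=
  ∃ p ∈ result, p.1 ≠ "last"
instance (result : List (String × String)) (pair : String) : Decidable (Pre_result_series_key_py result pair) := by unfold Pre_result_series_key_py; infer_instance

def pvWitness_result_series_key_py : (List (String × String)) × String :=
  ([("XXBTZUSD", "1"), ("last", "2")], "XBTZUSD")

def Spec_result_series_key_py (result : List (String × String)) (pair : String) (out : String) : Prop := out = result_series_key_py_alt result pair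
instance (result : List (String × String)) (pair : String) (out : String) : Decidable (Spec_result_series_key_py result pair out) := by unfold Spec_result_series_key_py; infer_instance

-- ===== CLAIM (what is proved, stated in full; the proofs are below) =====
def Claim_equal_result_series_key_py : Prop := ∀ (result : List (String × String)) (pair : String), Dom_result_series_key_py result pair → Pre_result_series_key_py result pair → Spec_result_series_key_py result pair (result_series_key_py result pair)

-- ===== LEMMAS AND PROOFS =====

-- filter commutes with enumerate's snd projection
theorem pv_filter_enum_snd (keys : List String) (s : Int) :
    ((PySem.List.enumerate keys s).filter (fun p => p.2 != "last")).map (·.2)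
      = keys.filter (fun k => k != "last") := by
  induction keys generalizing s with
  | nil => simp [PySem.List.enumerate_nil]
  | cons k t ih =>
    by_cases h : k = "last" <;>
      simp [PySem.List.enumerate_cons, h, ih]

-- min2? on a cons with strictly increasing indices is the first rank-0 element,
-- falling back to the head
theorem pv_min2_cons (pair : String) (c : Int × String) (rest : List (Int × String))
    (hp : ∀ p ∈ rest, c.1 < p.1)
    (hpw : rest.Pairwise (fun a b => a.1 < b.1)) :
    PySem.List.min2? (c :: rest) (pvRank pair) (fun p => p.1)
      = some (if pvKeyMatch pair c.2 then c
              else (rest.find? (fun p => pvKeyMatch pair p.2)).getD c) := by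
  simp only [PySem.List.min2?, List.foldl_cons]
  induction rest generalizing c with
  | nil => by_cases h : pvKeyMatch pair c.2 <;> simp [h]
  | cons x t ih =>
    have hcx : c.1 < x.1 := hp x (by simp)
    have hxt : ∀ p ∈ t, x.1 < p.1 := by
      intro p hpmem
      exact (List.pairwise_cons.mp hpw).1 p hpmem
    have hct : ∀ p ∈ t, c.1 < p.1 := fun p hpmem => hp p (by simp [hpmem])
    have htw : t.Pairwise (fun a b => a.1 < b.1) := (List.pairwise_cons.mp hpw).2
    simp only [List.foldl_cons]
    by_cases hc : pvKeyMatch pair c.2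
    · -- c already matches: x never replaces it (rank ≥ 0, index larger)
      have hstep : (decide (pvRank pair x < pvRank pair c)
          || !decide (pvRank pair c < pvRank pair x) && decide (x.1 < c.1)) = false := by
        by_cases hx : pvKeyMatch pair x.2 <;> simp [pvRank, hc, hx] <;> omega
      simp only [hstep, Bool.false_eq_true, if_false]
      simpa [hc] using ih c hct htw
    · by_cases hx : pvKeyMatch pair x.2
      · -- x matches, c does not: x replaces c and then stays
        have hstep : (decide (pvRank pair x < pvRank pair c)
            || !decide (pvRank pair c < pvRank pair x) && decide (x.1 < c.1)) = true := by
          simp [pvRank, hc, hx]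
        simp only [hstep, if_true]
        simpa [hx, hc] using ih x hxt htw
      · -- neither matches: ranks tie, c's index is smaller, c stays
        have hstep : (decide (pvRank pair x < pvRank pair c)
            || !decide (pvRank pair c < pvRank pair x) && decide (x.1 < c.1)) = false := by
          simp [pvRank, hc, hx]; omega
        simp only [hstep, Bool.false_eq_true, if_false]
        simpa [hc, hx] using ih c hct htw

-- find? through the snd projection
theorem pv_find_map_snd (q : String → Bool) (l : List (Int × String)) :
    (l.map (·.2)).find? q = (l.find? (fun p => q p.2)).map (·.2) := by
  induction l with
  | nil => simp
  | cons x t ih => by_cases h : q x.2 <;> simp [List.find?_cons, h, ih]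

-- ===== VERDICT (by name: the statement is the Claim_ definition above) =====
theorem result_series_key_py_spec : Claim_equal_result_series_key_py := by
  intro result pair _ _
  unfold Spec_result_series_key_py result_series_key_py result_series_key_py_alt
  set keys := PySem.List.dedup (result.map (·.1)) with hkeys
  have hmap := pv_filter_enum_snd keys 0
  have hpw : ((PySem.List.enumerate keys 0).filter (fun p => p.2 != "last")).Pairwise
      (fun a b => a.1 < b.1) :=
    (PySem.List.pairwise_lt_enumerate keys 0).filter _
  cases hc : (PySem.List.enumerate keys 0).filter (fun p => p.2 != "last") with
  | nil =>
    have : keys.filter (fun k => k != "last") = [] := by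
      rw [← hmap, hc]; rfl
    simp [this, PySem.List.min2?]
  | cons c rest =>
    have hfilter : keys.filter (fun k => k != "last") = c.2 :: rest.map (·.2) := by
      rw [← hmap, hc]; rfl
    rw [hc] at hpw
    have hp : ∀ p ∈ rest, c.1 < p.1 := (List.pairwise_cons.mp hpw).1
    have htw : rest.Pairwise (fun a b => a.1 < b.1) := (List.pairwise_cons.mp hpw).2
    simp only [pv_min2_cons pair c rest hp htw, hfilter]
    by_cases hcm : pvKeyMatch pair c.2
    · simp [hcm]
    · simp only [List.find?_cons, hcm, Bool.false_eq_true, if_false, pv_find_map_snd]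
      cases rest.find? (fun p => pvKeyMatch pair p.2) <;> simp
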